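-- pv_equiv track=rewrite | github.com/user28060/Alignment-of-schema-only-and-instance-only-data | src/schema_instance/schema_instance_gpt/rules.py | validate_givenNameLabel_Wikidata
-- ===== SOURCE A (Python) =====
-- def validate_givenNameLabel_Wikidata(values):
--     # Rule 1: 'givenNameLabel' must be of data type 'text'
--     if not all(isinstance(value, str) for value in values):
--         return False
--
--     # Rule 2: 'givenNameLabel' must not be empty
--     if not all(value.strip() for value in values):
--         return False
--
--     # Rule 3: 'givenNameLabel' must adhere to the format specified in the 'Wikidata' dataset
--     wikidata_format = "specified_format"  # Placeholder for Wikidata format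
--
--     for value in values:
--         if not value.startswith(wikidata_format):
--             return False
--
--     return True
-- ===== SOURCE B (Python) =====
-- def validate_givenNameLabel_Wikidata(values):
--     # single pass: check each value fully before moving on
--     for value in values:
--         if not isinstance(value, str):
--             return False
--         if not value.strip():
--             return False
--         if not value.startswith("specified_format"):
--             return False
--     return True
-- ===== Notes on version B (the rewrite author's own statement) =====
-- stated objective: simpler
-- what changed: Replaced A's three separate passes over the list (an isinstance pass, a strip pass, a startswith loop) with one early-exit loop that applies all three checks per element in order.
import Mathlib
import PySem

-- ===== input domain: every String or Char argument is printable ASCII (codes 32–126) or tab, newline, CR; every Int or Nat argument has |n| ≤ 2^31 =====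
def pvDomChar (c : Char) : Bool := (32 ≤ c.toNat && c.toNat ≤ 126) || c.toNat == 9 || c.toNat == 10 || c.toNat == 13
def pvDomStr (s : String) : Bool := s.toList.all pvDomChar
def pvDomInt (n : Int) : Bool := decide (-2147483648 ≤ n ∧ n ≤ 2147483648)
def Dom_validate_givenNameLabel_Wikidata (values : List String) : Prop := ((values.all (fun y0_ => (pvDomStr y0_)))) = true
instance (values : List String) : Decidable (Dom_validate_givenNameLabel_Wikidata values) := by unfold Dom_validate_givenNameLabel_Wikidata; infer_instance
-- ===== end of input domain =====

-- B replaces A's three separate passes with one early-exit per-element loop (objective: simpler).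


-- ===== PORT A =====
-- Rule 3 loop of A, step for step
def pvA_formatLoop : List String → Bool
  | [] => true
  | v :: rest =>
    if !(PySem.Str.startswith v "specified_format") then false
    else pvA_formatLoop rest

def validate_givenNameLabel_Wikidata (values : List String) : Bool :=
  -- Rule 1: isinstance(value, str) — trivially true under the type convention
  if !(values.all (fun _ => true)) then false
  -- Rule 2: all(value.strip()) — truthiness of the stripped string
  else if !(values.all (fun v => !(PySem.Str.strip v == ""))) then false
  -- Rule 3: the startswith loop
  else pvA_formatLoop values

-- ===== PORT B =====
def validate_givenNameLabel_Wikidata_alt : List String → Bool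
  | [] => true
  | v :: rest =>
    -- isinstance(v, str) is trivially true under the type convention
    if PySem.Str.strip v == "" then false
    else if !(PySem.Str.startswith v "specified_format") then false
    else validate_givenNameLabel_Wikidata_alt rest

-- ===== PRECONDITION & SPEC =====
def Spec_validate_givenNameLabel_Wikidata (values : List String) (out : Bool) : Prop := out = validate_givenNameLabel_Wikidata_alt values
instance (values : List String) (out : Bool) : Decidable (Spec_validate_givenNameLabel_Wikidata values out) := by unfold Spec_validate_givenNameLabel_Wikidata; infer_instance

-- ===== CLAIM (what is proved, stated in full; the proofs are below) =====
def Claim_equal_validate_givenNameLabel_Wikidata : Prop := ∀ (values : List String), Dom_validate_givenNameLabel_Wikidata values → Spec_validate_givenNameLabel_Wikidata values (validate_givenNameLabel_Wikidata values)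

-- ===== LEMMAS AND PROOFS =====
theorem pvA_eq_alt (values : List String) :
    validate_givenNameLabel_Wikidata values = validate_givenNameLabel_Wikidata_alt values := by
  induction values with
  | nil => rfl
  | cons v rest ih =>
    simp only [validate_givenNameLabel_Wikidata, List.all_cons,
      pvA_formatLoop, validate_givenNameLabel_Wikidata_alt] at *
    by_cases h1 : PySem.Str.strip v == ""
    · simp [h1]
    · cases h2 : PySem.Str.startswith v "specified_format" with
      | false => simp only [PySem.Str.startswith] at h2; simp [h1]
      | true => simp only [PySem.Str.startswith] at h2; simp [h1, h2]; rw [← ih]; simp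

-- ===== VERDICT (by name: the statement is the Claim_ definition above) =====
theorem validate_givenNameLabel_Wikidata_spec : Claim_equal_validate_givenNameLabel_Wikidata := by
  intro values _
  exact pvA_eq_alt values
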